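-- pv_equiv track=rewrite | github.com/sunseo18/algorithm | 프로그래머스/1/160586. 대충 만든 자판/대충 만든 자판.py | get_target_word_answer
-- ===== SOURCE A (Python) =====
-- def get_target_word_answer(key_dict, target):
--     answer = 0
--     for t in target:
--         if t in key_dict:
--             answer += key_dict[t]
--         else:
--             return -1
--     return answer
-- ===== SOURCE B (Python) =====
-- def get_target_word_answer(key_dict, target):
--     if all(t in key_dict for t in target):
--         return sum(key_dict[t] for t in target)
--     return -1
-- ===== Notes on version B (the rewrite author's own statement) =====
-- stated objective: idiomatic
-- what changed: Replaces the single interleaved accumulate-and-check loop with two separate passes: an all() membership validation followed by a sum() of the lookups.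
import Mathlib
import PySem

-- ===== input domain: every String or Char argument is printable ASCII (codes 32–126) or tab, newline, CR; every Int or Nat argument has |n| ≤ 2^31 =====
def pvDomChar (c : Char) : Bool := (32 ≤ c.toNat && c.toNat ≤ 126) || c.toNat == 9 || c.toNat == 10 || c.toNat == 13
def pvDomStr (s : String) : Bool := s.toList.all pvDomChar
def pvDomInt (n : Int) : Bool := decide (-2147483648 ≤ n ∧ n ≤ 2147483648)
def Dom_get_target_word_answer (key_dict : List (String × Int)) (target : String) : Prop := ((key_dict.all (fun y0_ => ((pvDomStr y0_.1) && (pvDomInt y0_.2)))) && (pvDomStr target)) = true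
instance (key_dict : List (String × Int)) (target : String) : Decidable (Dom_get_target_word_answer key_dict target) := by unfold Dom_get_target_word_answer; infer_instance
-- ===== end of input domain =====

-- B separates validation (all keys present) from summation, two passes instead of one interleaved loop.


-- dict[t] / 't in dict' for a one-char string t: first matching key in the association list
def pvLook (kd : List (String × Int)) (c : Char) : Option Int :=
  (kd.find? (fun p => p.1 == String.mk [c])).map (·.2)

-- ===== PORT A =====
-- A's loop: accumulate key costs, return -1 at the first missing key
def pvGoA (kd : List (String × Int)) (acc : Int) : List Char → Int
  | [] => acc
  | c :: cs =>
    match pvLook kd c with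
    | some v => pvGoA kd (acc + v) cs
    | none => -1

def get_target_word_answer (key_dict : List (String × Int)) (target : String) : Int :=
  pvGoA key_dict 0 target.toList

-- ===== PORT B =====
def get_target_word_answer_alt (key_dict : List (String × Int)) (target : String) : Int :=
  if target.toList.all (fun c => (pvLook key_dict c).isSome) then
    (target.toList.map (fun c => (pvLook key_dict c).getD 0)).sum
  else -1

-- ===== PRECONDITION & SPEC =====
def Spec_get_target_word_answer (key_dict : List (String × Int)) (target : String) (out : Int) : Prop := out = get_target_word_answer_alt key_dict target
instance (key_dict : List (String × Int)) (target : String) (out : Int) : Decidable (Spec_get_target_word_answer key_dict target out) := by unfold Spec_get_target_word_answer; infer_instance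

-- ===== CLAIM (what is proved, stated in full; the proofs are below) =====
def Claim_equal_get_target_word_answer : Prop := ∀ (key_dict : List (String × Int)) (target : String), Dom_get_target_word_answer key_dict target → Spec_get_target_word_answer key_dict target (get_target_word_answer key_dict target)

-- ===== LEMMAS AND PROOFS =====
theorem pvGoA_eq (kd : List (String × Int)) (cs : List Char) :
    ∀ acc : Int, pvGoA kd acc cs =
      if cs.all (fun c => (pvLook kd c).isSome) then
        acc + (cs.map (fun c => (pvLook kd c).getD 0)).sum
      else -1 := by
  induction cs with
  | nil => intro acc; simp [pvGoA]
  | cons c cs ih =>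
    intro acc
    cases h : pvLook kd c with
    | none => simp [pvGoA, h]
    | some v =>
      simp only [pvGoA, h, ih, List.all_cons, List.map_cons, List.sum_cons,
        Option.isSome_some, Bool.true_and, Option.getD_some]
      split_ifs <;> omega

-- ===== VERDICT (by name: the statement is the Claim_ definition above) =====
theorem get_target_word_answer_spec : Claim_equal_get_target_word_answer := by
  intro kd target _
  unfold Spec_get_target_word_answer get_target_word_answer get_target_word_answer_alt
  rw [pvGoA_eq]
  split_ifs <;> simp
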